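-- pv_equiv track=rewrite | github.com/Gretoffel/RoN-SwatLLM | tests/lint.py | get_doxygen_block_c
-- ===== SOURCE A (Python) =====
-- def get_doxygen_block_c(lines: list[str], lineIdx: int) -> str:
-- 	"""Walk backwards above lineIdx and collect the /** or /// Doxygen block."""
-- 	blockLines: list[str] = []
-- 	i = lineIdx - 1
--
-- 	while i >= 0:
-- 		stripped = lines[i].strip()
--
-- 		if (
-- 			stripped.startswith("*")
-- 			or stripped.startswith("/**")
-- 			or stripped.startswith("///")
-- 			or stripped.startswith("//!")
-- 		):
-- 			blockLines.insert(0, stripped)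
--
-- 			if stripped.startswith("/**"):
-- 				break
--
-- 			i -= 1
-- 		else:
-- 			break
--
-- 	return "\n".join(blockLines)
-- ===== SOURCE B (Python) =====
-- def get_doxygen_block_c(lines: list[str], lineIdx: int) -> str:
-- 	"""Walk backwards above lineIdx and collect the /** or /// Doxygen block."""
-- 	start = lineIdx
-- 	for i in range(lineIdx - 1, -1, -1):
-- 		stripped = lines[i].strip()
-- 		if stripped.startswith(("*", "/**", "///", "//!")):
-- 			start = i
-- 			if stripped.startswith("/**"):
-- 				break
-- 		else:
-- 			break
-- 	return "\n".join(lines[i].strip() for i in range(start, lineIdx))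
-- ===== Notes on version B (the rewrite author's own statement) =====
-- stated objective: alternative
-- what changed: B splits the work into two passes: a backward scan that only computes the start boundary index, then a forward pass that materializes the block by joining the stripped lines of lines[start:lineIdx], instead of A's single backward loop that builds the block by inserting each stripped line at position 0 of an accumulator list.
import Mathlib
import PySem

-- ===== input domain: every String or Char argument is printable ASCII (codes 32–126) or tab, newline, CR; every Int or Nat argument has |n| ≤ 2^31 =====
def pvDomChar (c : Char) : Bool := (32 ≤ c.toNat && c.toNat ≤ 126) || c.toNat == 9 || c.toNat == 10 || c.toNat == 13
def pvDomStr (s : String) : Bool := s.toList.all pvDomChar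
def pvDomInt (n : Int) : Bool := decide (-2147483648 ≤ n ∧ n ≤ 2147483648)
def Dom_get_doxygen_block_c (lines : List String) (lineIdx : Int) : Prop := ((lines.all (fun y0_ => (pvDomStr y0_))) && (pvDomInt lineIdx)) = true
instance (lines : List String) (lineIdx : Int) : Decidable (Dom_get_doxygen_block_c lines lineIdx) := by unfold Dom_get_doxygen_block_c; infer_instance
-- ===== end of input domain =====

-- B replaces A's backward accumulate-by-insert loop with a boundary-finding backward scan
-- plus a forward join over the found range (objective: alternative decomposition).
-- A raises IndexError when lineIdx > len(lines) (so does B); Pre_ excludes exactly those inputs.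

-- ===== PORT A =====
-- the stripped line i, and whether it matches the Doxygen-comment test (shared text of both Pythons)
def pvStripAt (lines : List String) (i : Int) : String :=
  PySem.Str.strip ((PySem.List.pyGet? lines i).getD "")

def pvIsDox (s : String) : Bool :=
  PySem.Str.startswith s "*" || PySem.Str.startswith s "/**" ||
  PySem.Str.startswith s "///" || PySem.Str.startswith s "//!"

-- A's while-loop: i counts down from lineIdx-1 (represented as a Nat since the loop requires i ≥ 0),
-- blockLines accumulated by insert-at-front.
def pvLoopA (lines : List String) : Nat → List String → List String
  | 0, blockLines =>
    let stripped := pvStripAt lines (0 : Int)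
    if pvIsDox stripped then stripped :: blockLines else blockLines
  | j + 1, blockLines =>
    let stripped := pvStripAt lines ((j : Int) + 1)
    if pvIsDox stripped then
      if PySem.Str.startswith stripped "/**" then stripped :: blockLines
      else pvLoopA lines j (stripped :: blockLines)
    else blockLines

def get_doxygen_block_c (lines : List String) (lineIdx : Int) : String :=
  if h : 0 ≤ lineIdx - 1 then
    PySem.Str.join "\n" (pvLoopA lines (lineIdx - 1).toNat [])
  else
    PySem.Str.join "\n" []

-- ===== PORT B =====
-- B's backward boundary scan: carries `start` through the loop; returns the final start index.
def pvLoopB (lines : List String) : Nat → Int → Int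
  | 0, start => if pvIsDox (pvStripAt lines (0 : Int)) then (0 : Int) else start
  | j + 1, start =>
    let stripped := pvStripAt lines ((j : Int) + 1)
    if pvIsDox stripped then
      if PySem.Str.startswith stripped "/**" then ((j : Int) + 1)
      else pvLoopB lines j ((j : Int) + 1)
    else start

def get_doxygen_block_c_alt (lines : List String) (lineIdx : Int) : String :=
  let start : Int :=
    if h : 0 ≤ lineIdx - 1 then pvLoopB lines (lineIdx - 1).toNat lineIdx else lineIdx
  PySem.Str.join "\n" ((PySem.List.pyRange start lineIdx 1).map (fun i => pvStripAt lines i))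

-- ===== PRECONDITION & SPEC =====
-- Pre_ excludes exactly the inputs where A (and B) raise IndexError: lineIdx - 1 ≥ len(lines).
def Pre_get_doxygen_block_c (lines : List String) (lineIdx : Int) : Prop :=
  lineIdx ≤ (lines.length : Int)
instance (lines : List String) (lineIdx : Int) : Decidable (Pre_get_doxygen_block_c lines lineIdx) := by unfold Pre_get_doxygen_block_c; infer_instance

def pvWitness_get_doxygen_block_c : List String × Int := (["/** doc", " * more"], 2)

def Spec_get_doxygen_block_c (lines : List String) (lineIdx : Int) (out : String) : Prop := out = get_doxygen_block_c_alt lines lineIdx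
instance (lines : List String) (lineIdx : Int) (out : String) : Decidable (Spec_get_doxygen_block_c lines lineIdx out) := by unfold Spec_get_doxygen_block_c; infer_instance

-- ===== CLAIM (what is proved, stated in full; the proofs are below) =====
def Claim_equal_get_doxygen_block_c : Prop := ∀ (lines : List String) (lineIdx : Int), Dom_get_doxygen_block_c lines lineIdx → Pre_get_doxygen_block_c lines lineIdx → Spec_get_doxygen_block_c lines lineIdx (get_doxygen_block_c lines lineIdx)

-- ===== LEMMAS AND PROOFS =====

-- B's scan result is bounded: 0 ≤ pvLoopB lines i (i+1) ≤ i+1.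
theorem pvLoopB_bounds (lines : List String) : ∀ i : Nat,
    0 ≤ pvLoopB lines i ((i : Int) + 1) ∧ pvLoopB lines i ((i : Int) + 1) ≤ (i : Int) + 1 := by
  intro i
  induction i with
  | zero => unfold pvLoopB; split_ifs <;> simp
  | succ j ih =>
      unfold pvLoopB
      dsimp only
      split_ifs with h1 h2
      · constructor <;> push_cast <;> omega
      · push_cast
        omega
      · constructor <;> push_cast <;> omega

-- Key invariant: A's accumulator loop equals the stripped lines over B's range [start, i+1).
theorem pvLoop_agree (lines : List String) : ∀ (i : Nat) (acc : List String),
    pvLoopA lines i acc =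
      ((PySem.List.pyRange (pvLoopB lines i ((i : Int) + 1)) ((i : Int) + 1) 1).map
        (fun k => pvStripAt lines k)) ++ acc := by
  intro i
  induction i with
  | zero =>
      intro acc
      unfold pvLoopA pvLoopB
      dsimp only
      split_ifs with h1
      · push_cast
        rw [PySem.List.pyRange_one 0 1]
        simp
      · push_cast
        rw [PySem.List.pyRange_one_eq_nil (by omega)]
        simp
  | succ j ih =>
      intro acc
      unfold pvLoopA pvLoopB
      dsimp only
      split_ifs with h1 h2
      · push_cast
        rw [PySem.List.pyRange_one_singleton]
        simp
      · have hb := pvLoopB_bounds lines j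
        rw [ih]
        have hsplit : PySem.List.pyRange (pvLoopB lines j ((j : Int) + 1)) (((j : Nat) + 1 : Nat) + 1) 1
            = PySem.List.pyRange (pvLoopB lines j ((j : Int) + 1)) ((j : Int) + 1) 1
              ++ [(j : Int) + 1] := by
          push_cast
          rw [PySem.List.pyRange_one_succ_right hb.2]
        rw [hsplit]
        simp
      · push_cast
        rw [PySem.List.pyRange_one_eq_nil (by omega)]
        simp

-- ===== VERDICT (by name: the statement is the Claim_ definition above) =====
theorem get_doxygen_block_c_spec : Claim_equal_get_doxygen_block_c := by
  intro lines lineIdx _hdom _hpre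
  unfold Spec_get_doxygen_block_c get_doxygen_block_c get_doxygen_block_c_alt
  by_cases h : 0 ≤ lineIdx - 1
  · simp only [dif_pos h]
    have hcast : ((lineIdx - 1).toNat : Int) = lineIdx - 1 := Int.toNat_of_nonneg h
    have := pvLoop_agree lines (lineIdx - 1).toNat []
    rw [hcast] at this
    have h2 : lineIdx - 1 + 1 = lineIdx := by omega
    rw [h2] at this
    rw [this]
    simp
  · simp only [dif_neg h]
    rw [PySem.List.pyRange_one_eq_nil (by omega)]
    simp
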